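-- pv_equiv track=rewrite | github.com/eightycc/g15_fpga | papertapes/asm.py | word29_to_str
-- ===== SOURCE A (Python) =====
-- digit_0_z = ['0', '1', '2', '3', '4', '5', '6', '7', '8', '9',
--              'u', 'v', 'w', 'x', 'y', 'z']
--
-- def word29_to_str(word):
--     if (word & 0x1 != 0):
--         strout = "-."
--     else:
--         strout = " ."
--     word >>= 1
--     for i in range(7):
--         strout += digit_0_z[word >> (4 * (6 - i)) & 0xf]
--     return strout
-- ===== SOURCE B (Python) =====
-- _TR = str.maketrans('abcdef', 'uvwxyz')
--
-- def word29_to_str(word):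
--     prefix = "-." if word & 1 else " ."
--     w = (word >> 1) & 0xFFFFFFF
--     return prefix + format(w, '07x').translate(_TR)
-- ===== Notes on version B (the rewrite author's own statement) =====
-- stated objective: idiomatic
-- what changed: B replaces A's explicit 7-iteration shift-and-table-index loop by masking the word to 28 bits once and formatting it with format(w,'07x'), then remapping the hex digits a-f to u-z with a precomputed str.translate table.
import Mathlib
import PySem

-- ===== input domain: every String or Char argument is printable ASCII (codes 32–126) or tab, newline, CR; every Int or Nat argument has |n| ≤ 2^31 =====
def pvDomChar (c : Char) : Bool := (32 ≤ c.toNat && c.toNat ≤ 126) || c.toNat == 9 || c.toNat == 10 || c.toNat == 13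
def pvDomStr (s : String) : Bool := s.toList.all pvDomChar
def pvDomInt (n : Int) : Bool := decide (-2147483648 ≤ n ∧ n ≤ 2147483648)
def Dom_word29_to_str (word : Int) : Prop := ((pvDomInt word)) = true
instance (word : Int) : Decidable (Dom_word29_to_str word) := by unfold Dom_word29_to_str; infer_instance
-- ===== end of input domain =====

-- B formats the masked 28-bit value in one format-and-translate pass instead of A's
-- explicit 7-iteration shift/table-index loop (objective: idiomatic).

-- ===== PORT A =====
def digit_0_z : List Char :=
  ['0', '1', '2', '3', '4', '5', '6', '7', '8', '9',
   'u', 'v', 'w', 'x', 'y', 'z']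

-- literal port of A; the shift amount 4*(6-i) is always nonnegative, so .toNat is exact,
-- and the table index is always in 0..15, so the .getD default is never used.
def word29_to_str (word : Int) : String :=
  let strout : String := if PySem.Int.band word 1 ≠ 0 then "-." else " ."
  let word1 : Int := word >>> (1 : Nat)
  (PySem.List.pyRange 0 7 1).foldl
    (fun s i =>
      s ++ String.singleton
        ((PySem.List.pyGet? digit_0_z
            (PySem.Int.band (word1 >>> ((4 * (6 - i)).toNat)) 0xf)).getD ' '))
    strout

-- ===== PORT B =====
-- port of Source B's format(w, '07x'): lowercase hex digits of w, left-padded with '0' to width 7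
def hexChar (d : Nat) : Char := if d < 10 then Char.ofNat (48 + d) else Char.ofNat (87 + d)

-- port of Source B's str.maketrans('abcdef','uvwxyz') translation, applied per character
def trChar (c : Char) : Char := if 'a' ≤ c ∧ c ≤ 'f' then Char.ofNat (c.toNat + 20) else c

def word29_to_str_alt (word : Int) : String :=
  let pre : String := if PySem.Int.band word 1 ≠ 0 then "-." else " ."
  let w : Nat := (PySem.Int.band (word >>> (1 : Nat)) 0xFFFFFFF).toNat
  let ds : List Char := ((Nat.digits 16 w).map hexChar).reverse
  pre ++ String.ofList ((List.replicate (7 - ds.length) '0' ++ ds).map trChar)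

-- ===== PRECONDITION & SPEC =====
def Spec_word29_to_str (word : Int) (out : String) : Prop := out = word29_to_str_alt word
instance (word : Int) (out : String) : Decidable (Spec_word29_to_str word out) := by unfold Spec_word29_to_str; infer_instance

-- ===== CLAIM (what is proved, stated in full; the proofs are below) =====
def Claim_equal_word29_to_str : Prop := ∀ (word : Int), Dom_word29_to_str word → Spec_word29_to_str word (word29_to_str word)

-- ===== LEMMAS AND PROOFS =====

-- Int right shift by a Nat is floor division by the power of two
lemma int_shiftRight_eq_div_pow (x : Int) (k : Nat) : x >>> k = x / 2 ^ k := by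
  rcases x with m | m
  · show ((m >>> k : Nat) : Int) = _
    rw [Nat.shiftRight_eq_div_pow, Int.natCast_ediv]
    norm_num
  · show (Int.negSucc (m >>> k)) = _
    rw [Nat.shiftRight_eq_div_pow]
    have hp : (0:Int) < 2 ^ k := by positivity
    have hm := Nat.div_add_mod m (2 ^ k)
    have hlt := Nat.mod_lt m (y := 2 ^ k) (by positivity)
    have h2 : ((2:Int) ^ k) = ((2 ^ k : Nat) : Int) := by push_cast; ring
    have := (Int.ediv_emod_unique (a := Int.negSucc m) (b := 2^k)
      (r := 2^k - 1 - (m % 2^k : Nat)) (q := -((m / 2^k : Nat) + 1)) hp).mpr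
      (by rw [Int.negSucc_eq]; constructor
          · rw [h2]; push_cast; nlinarith [hm]
          · rw [h2]; omega)
    rw [Int.negSucc_eq, this.1.symm, Int.negSucc_eq]

-- Python's x & (2^n - 1) is x mod 2^n, also for negative x
lemma band_two_pow_sub_one (x : Int) (n : Nat) :
    PySem.Int.band x (2 ^ n - 1) = x % (2 ^ n) := by
  have h1 : 1 ≤ 2 ^ n := Nat.one_le_two_pow
  have h2 : ((2:Int) ^ n - 1) = ((2 ^ n - 1 : Nat) : Int) := by push_cast [h1]; ring
  have hpow : ((2:Int) ^ n) = ((2 ^ n : Nat) : Int) := by push_cast; ring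
  rcases x with m | m
  · show PySem.Int.band (m : Int) _ = _
    rw [h2, PySem.Int.band_natCast, Nat.and_two_pow_sub_one_eq_mod, hpow]
    norm_cast
  · rw [PySem.Int.band]
    have hb : (0:Int) ≤ 2 ^ n - 1 := by rw [h2]; positivity
    have hneg : ¬ (0:Int) ≤ Int.negSucc m := by omega
    simp only [if_neg hneg, if_pos hb]
    have hmask : ((2:Int) ^ n - 1).toNat = 2 ^ n - 1 := by rw [h2]; exact Int.toNat_natCast _
    have harg : (-(Int.negSucc m) - 1).toNat = m := by rw [Int.negSucc_eq]; omega
    rw [hmask, harg, Nat.and_comm, Nat.and_two_pow_sub_one_eq_mod, Int.negSucc_eq, hpow]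
    have hm : (m : Int) = (2 ^ n : Nat) * ((m / 2 ^ n : Nat) : Int) + ((m % 2 ^ n : Nat) : Int) := by
      exact_mod_cast (Nat.div_add_mod m (2 ^ n)).symm
    have hlt := Nat.mod_lt m (y := 2 ^ n) (by positivity)
    have key : -((m:Int) + 1) % ((2 ^ n : Nat) : Int)
        = ((2 ^ n : Nat) : Int) - 1 - ((m % 2 ^ n : Nat) : Int) := by
      have hrw : -((m:Int) + 1)
          = (((2 ^ n : Nat) : Int) - 1 - ((m % 2 ^ n : Nat) : Int))
            + ((2 ^ n : Nat) : Int) * (-(((m / 2 ^ n : Nat) : Int) + 1)) := by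
        linear_combination -hm
      rw [hrw, Int.add_mul_emod_self_left]
      exact Int.emod_eq_of_lt (by omega) (by omega)
    rw [key]
    omega

-- little-endian digit padding: the 16-ary digits of w < 16^k, padded to length k
lemma digits_pad (k : Nat) : ∀ w : Nat, w < 16 ^ k →
    Nat.digits 16 w ++ List.replicate (k - (Nat.digits 16 w).length) 0
      = (List.range k).map (fun i => w / 16 ^ i % 16) := by
  induction k with
  | zero =>
    intro w hw
    interval_cases w
    simp
  | succ k ih =>
    intro w hw
    rcases Nat.eq_zero_or_pos w with h0 | hpos
    · subst h0
      simp
    · rw [Nat.digits_def' (by norm_num : 1 < 16) hpos]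
      have hdiv : w / 16 < 16 ^ k := by
        rw [Nat.div_lt_iff_lt_mul (by norm_num)]
        calc w < 16 ^ (k+1) := hw
        _ = 16 ^ k * 16 := by ring
      have ihw := ih (w / 16) hdiv
      rw [List.range_succ_eq_map]
      simp only [List.length_cons, List.map_cons, List.map_map, List.cons_append]
      congr 1
      · simp [Nat.div_one]
      · rw [Nat.succ_sub_succ, ihw]
        apply List.map_congr_left
        intro i _
        simp [Function.comp, pow_succ, Nat.div_div_eq_div_mul]
        ring_nf

-- the table lookup of A equals translate-of-hex of B on every nibble
lemma lookup_eq (d : Nat) (hd : d < 16) :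
    (PySem.List.pyGet? digit_0_z (d : Int)).getD ' ' = trChar (hexChar d) := by
  interval_cases d <;> rfl

-- each extracted nibble of A is the corresponding base-16 digit of B's masked value
lemma nib (v : Int) (k : Nat) (hk : k ≤ 6) :
    PySem.Int.band (v >>> ((4 * k : Nat) : Int)) 15
      = (((PySem.Int.band v 0xFFFFFFF).toNat / 16 ^ k % 16 : Nat) : Int) := by
  have hmask : PySem.Int.band v 0xFFFFFFF = v % 2 ^ 28 := by
    have := band_two_pow_sub_one v 28; norm_num at this ⊢; exact this
  rw [Int.shiftRight_natCast_right]
  have h15 : PySem.Int.band (v >>> (4 * k)) 15 = (v >>> (4 * k)) % 2 ^ 4 := by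
    have := band_two_pow_sub_one (v >>> (4 * k)) 4; norm_num at this ⊢; exact this
  rw [h15, int_shiftRight_eq_div_pow, hmask]
  have hnn : (0:Int) ≤ v % 2 ^ 28 := Int.emod_nonneg v (by norm_num)
  have hlt : v % 2 ^ 28 < 2 ^ 28 := Int.emod_lt_of_pos v (by norm_num)
  interval_cases k <;> omega

-- ===== VERDICT (by name: the statement is the Claim_ definition above) =====
theorem word29_to_str_spec : Claim_equal_word29_to_str := by
  intro word _
  unfold Spec_word29_to_str word29_to_str word29_to_str_alt
  set v : Int := word >>> (1 : Nat) with hv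
  set w : Nat := (PySem.Int.band v 0xFFFFFFF).toNat with hwdef
  have hwlt : w < 16 ^ 7 := by
    have hmask : PySem.Int.band v 0xFFFFFFF = v % 2 ^ 28 := by
      have := band_two_pow_sub_one v 28; norm_num at this ⊢; exact this
    have hlt : v % 2 ^ 28 < 2 ^ 28 := Int.emod_lt_of_pos v (by norm_num)
    rw [hwdef, hmask]
    omega
  -- evaluate A's loop over range(7)
  have hrange : PySem.List.pyRange 0 7 1 = [0, 1, 2, 3, 4, 5, 6] := by decide
  rw [hrange]
  simp only [List.foldl_cons, List.foldl_nil]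
  simp only [show ((4 * (6 - (0:Int))).toNat) = 24 by decide,
    show ((4 * (6 - (1:Int))).toNat) = 20 by decide,
    show ((4 * (6 - (2:Int))).toNat) = 16 by decide,
    show ((4 * (6 - (3:Int))).toNat) = 12 by decide,
    show ((4 * (6 - (4:Int))).toNat) = 8 by decide,
    show ((4 * (6 - (5:Int))).toNat) = 4 by decide,
    show ((4 * (6 - (6:Int))).toNat) = 0 by decide]
  -- turn each extracted nibble into the corresponding base-16 digit of w
  have e0 : PySem.Int.band (v >>> ((0:Nat):Int)) 15 = ((w / 16 ^ 0 % 16 : Nat) : Int) := nib v 0 (by norm_num)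
  have e1 : PySem.Int.band (v >>> ((4:Nat):Int)) 15 = ((w / 16 ^ 1 % 16 : Nat) : Int) := nib v 1 (by norm_num)
  have e2 : PySem.Int.band (v >>> ((8:Nat):Int)) 15 = ((w / 16 ^ 2 % 16 : Nat) : Int) := nib v 2 (by norm_num)
  have e3 : PySem.Int.band (v >>> ((12:Nat):Int)) 15 = ((w / 16 ^ 3 % 16 : Nat) : Int) := nib v 3 (by norm_num)
  have e4 : PySem.Int.band (v >>> ((16:Nat):Int)) 15 = ((w / 16 ^ 4 % 16 : Nat) : Int) := nib v 4 (by norm_num)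
  have e5 : PySem.Int.band (v >>> ((20:Nat):Int)) 15 = ((w / 16 ^ 5 % 16 : Nat) : Int) := nib v 5 (by norm_num)
  have e6 : PySem.Int.band (v >>> ((24:Nat):Int)) 15 = ((w / 16 ^ 6 % 16 : Nat) : Int) := nib v 6 (by norm_num)
  rw [e0, e1, e2, e3, e4, e5, e6]
  rw [lookup_eq _ (Nat.mod_lt _ (by norm_num)), lookup_eq _ (Nat.mod_lt _ (by norm_num)),
      lookup_eq _ (Nat.mod_lt _ (by norm_num)), lookup_eq _ (Nat.mod_lt _ (by norm_num)),
      lookup_eq _ (Nat.mod_lt _ (by norm_num)), lookup_eq _ (Nat.mod_lt _ (by norm_num)),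
      lookup_eq _ (Nat.mod_lt _ (by norm_num))]
  -- evaluate B's padded hex string via the digit characterisation
  have hB : List.replicate (7 - (((Nat.digits 16 w).map hexChar).reverse).length) '0'
        ++ ((Nat.digits 16 w).map hexChar).reverse
      = List.map hexChar ((Nat.digits 16 w ++ List.replicate (7 - (Nat.digits 16 w).length) 0).reverse) := by
    simp [List.reverse_append, hexChar]
  have hlist : (List.range 7).reverse.map (fun i => w / 16 ^ i % 16)
      = [w / 16 ^ 6 % 16, w / 16 ^ 5 % 16, w / 16 ^ 4 % 16, w / 16 ^ 3 % 16,
         w / 16 ^ 2 % 16, w / 16 ^ 1 % 16, w / 16 ^ 0 % 16] := by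
    simp [List.range_succ]
  rw [hB, digits_pad 7 w hwlt, ← List.map_reverse, hlist]
  simp only [List.map_cons, List.map_nil]
  -- compare the strings character by character
  apply String.ext
  simp only [String.toList_append, String.toList_singleton, String.toList_ofList,
    List.append_assoc, List.cons_append, List.nil_append]
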